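-- pv_equiv track=rewrite | github.com/AIOCodeBase/GFGPOTD | January 2023/29 January 2023/.py | solve
-- ===== SOURCE A (Python) =====
-- def solve(a : int, b : int) -> int:
--       ans = a & b
--       count =0
--
--       while( a!= b):
--           x= a
--           a = a & ans
--           if( a==b):
--               count+=1
--               return count
--           if( x!=a): # if appliying and operation does change it
--               count+=1
--
--
--           y=b
--           b = b & ans
--           if( a==b ):
--               count+=1
--               return count
--
--           if( y !=b):# if appliying and operation does change it
--               count+=1
--
--       return count
-- ===== SOURCE B (Python) =====
-- def solve(a: int, b: int) -> int:
--     # Closed form: one AND-pass collapses both operands to a & b,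
--     # so the count is just how many of the two operands change.
--     ans = a & b
--     return (a != ans) + (b != ans)
-- ===== Notes on version B (the rewrite author's own statement) =====
-- stated objective: simpler
-- what changed: Replaced the while-loop simulation with a closed form: ans = a & b, answer = (a != ans) + (b != ans), since one AND application already fixes both operands.
import Mathlib
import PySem

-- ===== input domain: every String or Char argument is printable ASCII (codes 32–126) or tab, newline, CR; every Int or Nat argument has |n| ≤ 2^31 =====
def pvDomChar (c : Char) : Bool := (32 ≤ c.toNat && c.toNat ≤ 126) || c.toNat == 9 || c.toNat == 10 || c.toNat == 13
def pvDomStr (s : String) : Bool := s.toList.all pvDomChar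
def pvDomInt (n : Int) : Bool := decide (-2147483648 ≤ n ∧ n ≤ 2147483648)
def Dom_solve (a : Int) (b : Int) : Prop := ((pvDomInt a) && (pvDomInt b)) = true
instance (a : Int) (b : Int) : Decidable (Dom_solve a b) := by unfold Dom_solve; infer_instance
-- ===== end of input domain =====

-- B computes the count in closed form ((a != a&b) + (b != a&b)) instead of simulating A's while-loop; objective: simpler.

-- ===== PORT A =====
-- A's 'while a != b' loop, transliterated as a fuel recursion; the loop provably
-- runs at most one iteration (proved below), so the fuel guard is never exhausted.
def solveLoop : Nat → Int → Int → Int → Int → Int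
  | 0, _, _, _, count => count
  | fuel+1, a, b, ans, count =>
    if a ≠ b then
      let x := a
      let a1 := PySem.Int.band a ans
      if a1 = b then count + 1
      else
        let count1 := if x ≠ a1 then count + 1 else count
        let y := b
        let b1 := PySem.Int.band b ans
        if a1 = b1 then count1 + 1
        else
          let count2 := if y ≠ b1 then count1 + 1 else count1
          solveLoop fuel a1 b1 ans count2
    else count

def solve (a : Int) (b : Int) : Int :=
  solveLoop 2 a b (PySem.Int.band a b) 0

-- ===== PORT B =====
def solve_alt (a : Int) (b : Int) : Int :=
  let ans := PySem.Int.band a b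
  (if a ≠ ans then (1 : Int) else 0) + (if b ≠ ans then (1 : Int) else 0)

-- ===== PRECONDITION & SPEC =====
def Spec_solve (a : Int) (b : Int) (out : Int) : Prop := out = solve_alt a b
instance (a : Int) (b : Int) (out : Int) : Decidable (Spec_solve a b out) := by unfold Spec_solve; infer_instance

-- ===== CLAIM (what is proved, stated in full; the proofs are below) =====
def Claim_equal_solve : Prop := ∀ (a : Int) (b : Int), Dom_solve a b → Spec_solve a b (solve a b)

-- ===== LEMMAS AND PROOFS =====

-- bit k of x - (x &&& y) is (bit k of x) && !(bit k of y)
theorem pv_and_mod_two_le (x y : Nat) : (x &&& y) % 2 ≤ x % 2 := by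
  have h := Nat.testBit_and x y 0
  rcases Nat.mod_two_eq_zero_or_one (x &&& y) with h1 | h1 <;>
    rcases Nat.mod_two_eq_zero_or_one x with h2 | h2 <;>
      simp [Nat.testBit_zero, h1, h2] at h ⊢

theorem pv_testBit_sub_and (k : Nat) : ∀ (x y : Nat),
    (x - (x &&& y)).testBit k = ((x.testBit k) && !(y.testBit k)) := by
  induction k with
  | zero =>
    intro x y
    have h := Nat.testBit_and x y 0
    have hle : x &&& y ≤ x := Nat.and_le_left
    have hm : (x &&& y) % 2 ≤ x % 2 := pv_and_mod_two_le x y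
    rcases Nat.mod_two_eq_zero_or_one (x &&& y) with h1 | h1 <;>
      rcases Nat.mod_two_eq_zero_or_one x with h2 | h2 <;>
        rcases Nat.mod_two_eq_zero_or_one y with h3 | h3 <;>
          simp [Nat.testBit_zero, h1, h2, h3] at h ⊢ <;> omega
  | succ k ih =>
    intro x y
    have hle : x &&& y ≤ x := Nat.and_le_left
    have hm : (x &&& y) % 2 ≤ x % 2 := pv_and_mod_two_le x y
    have hdiv : (x - (x &&& y)) / 2 = x / 2 - (x / 2 &&& y / 2) := by
      rw [← Nat.and_div_two]; omega
    rw [Nat.testBit_succ, hdiv, ih, ← Nat.testBit_succ, ← Nat.testBit_succ]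

theorem pv_and_sub_and (x y : Nat) : x &&& (x - (x &&& y)) = x - (x &&& y) := by
  apply Nat.eq_of_testBit_eq
  intro k
  rw [Nat.testBit_and, pv_testBit_sub_and]
  cases x.testBit k <;> cases y.testBit k <;> rfl

theorem pv_sub_and_and (x y : Nat) : (x - (x &&& y)) &&& y = 0 := by
  apply Nat.eq_of_testBit_eq
  intro k
  rw [Nat.testBit_and, pv_testBit_sub_and, Nat.zero_testBit]
  cases x.testBit k <;> cases y.testBit k <;> rfl

theorem pv_or_absorb (x y : Nat) : x ||| (x ||| y) = x ||| y := by
  rw [← Nat.or_assoc, Nat.or_self]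

-- a & (a & b) = a & b for Python's &
theorem pv_band_absorb (a b : Int) :
    PySem.Int.band a (PySem.Int.band a b) = PySem.Int.band a b := by
  unfold PySem.Int.band
  by_cases ha : 0 ≤ a <;> by_cases hb : 0 ≤ b <;> simp only [ha, hb, if_false, if_pos]
  · -- a ≥ 0, b ≥ 0
    simp only [Int.natCast_nonneg, if_true, Int.toNat_natCast]
    rw [← Nat.and_assoc, Nat.and_self]
  · -- a ≥ 0, b < 0
    simp only [Int.natCast_nonneg, if_true, Int.toNat_natCast]
    rw [pv_and_sub_and]
  · -- a < 0, b ≥ 0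
    simp only [Int.natCast_nonneg, if_true, Int.toNat_natCast]
    rw [pv_sub_and_and]
    simp
  · -- a < 0, b < 0
    have hneg : ¬ (0 ≤ -(((-a - 1).toNat ||| (-b - 1).toNat : Nat) : Int) - 1) := by
      have : (0 : Int) ≤ (((-a - 1).toNat ||| (-b - 1).toNat : Nat) : Int) := Int.natCast_nonneg _
      omega
    simp only [hneg, if_false]
    have harg : (-(-(((-a - 1).toNat ||| (-b - 1).toNat : Nat) : Int) - 1) - 1).toNat
        = (-a - 1).toNat ||| (-b - 1).toNat := by omega
    rw [harg, pv_or_absorb]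

theorem pv_band_absorb' (a b : Int) :
    PySem.Int.band b (PySem.Int.band a b) = PySem.Int.band a b := by
  rw [PySem.Int.band_comm a b]
  exact pv_band_absorb b a

-- ===== VERDICT (by name: the statement is the Claim_ definition above) =====
theorem solve_spec : Claim_equal_solve := by
  intro a b _
  have h1 := pv_band_absorb a b
  have h2 := pv_band_absorb' a b
  unfold Spec_solve solve solve_alt
  by_cases hab : a = b
  · subst hab
    simp [solveLoop, PySem.Int.band_self]
  · by_cases hb : PySem.Int.band a b = b
    · simp [solveLoop, hab, hb]
    · have hba : b ≠ PySem.Int.band a b := fun h => hb h.symm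
      simp [solveLoop, h1, h2, hab, hb, hba]
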